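-- pv_equiv track=rewrite | github.com/ajibolashodipo/Python-playground | Leetcode/GS_Encryption.py | encryptionValidity
-- ===== SOURCE A (Python) =====
-- def encryptionValidity(instCount, validity, keys):
--     maxi = 0
--     keys.sort(reverse=True)
--     for key in range(len(keys)):
--         temp = 0
--         for j in range(key, len(keys)):
--             if keys[key] % keys[j] == 0:
--                 temp += 1
--         maxi = max(temp, maxi)
--
--     strength = maxi * 100000
--
--     test = instCount * validity
--
--     if strength < test:
--         return 1, strength
--     else:
--         return 0, strength
-- ===== SOURCE B (Python) =====
-- def encryptionValidity(instCount, validity, keys):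
--     cnt = {}
--     for y in keys:
--         cnt[y] = cnt.get(y, 0) + 1
--     maxi = 0
--     for v in cnt:
--         total = 0
--         for y, c in cnt.items():
--             if y <= v and v % y == 0:
--                 total += c
--         if total > maxi:
--             maxi = total
--     strength = maxi * 100000
--     if strength < instCount * validity:
--         return 1, strength
--     else:
--         return 0, strength
-- ===== Notes on version B (the rewrite author's own statement) =====
-- stated objective: alternative
-- what changed: B replaces A's in-place descending sort and per-index suffix scans by a frequency table (dict of counts) built in one pass, then maximises over distinct keys the sum of counts of dividing smaller-or-equal keys, so duplicates are processed once; B does not mutate keys.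
import Mathlib
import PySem

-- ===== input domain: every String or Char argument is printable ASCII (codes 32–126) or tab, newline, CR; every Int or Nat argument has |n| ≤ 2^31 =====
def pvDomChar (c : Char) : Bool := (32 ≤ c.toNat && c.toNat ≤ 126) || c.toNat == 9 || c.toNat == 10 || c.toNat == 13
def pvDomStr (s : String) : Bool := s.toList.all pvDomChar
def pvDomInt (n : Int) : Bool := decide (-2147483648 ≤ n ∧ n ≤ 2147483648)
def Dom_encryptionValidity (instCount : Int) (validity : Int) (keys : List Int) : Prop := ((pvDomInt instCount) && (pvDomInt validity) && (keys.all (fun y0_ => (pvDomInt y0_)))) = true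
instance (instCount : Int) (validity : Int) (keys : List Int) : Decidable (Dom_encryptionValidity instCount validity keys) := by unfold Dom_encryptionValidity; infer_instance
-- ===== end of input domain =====

-- B replaces A's in-place descending sort and suffix scans by a frequency table (Counter) and a
-- scan over distinct keys (objective: alternative).
-- Note: Python A sorts `keys` in place; B does not mutate — the equivalence proved here is about the return value only.

-- ===== PORT A =====
def encryptionValidity (instCount : Int) (validity : Int) (keys : List Int) : List Int :=
  let s := PySem.List.sorted keys (fun x => x) true
  let maxi := (PySem.List.pyRange 0 (PySem.List.len s)).foldl (fun maxi key =>
      let temp := (PySem.List.pyRange key (PySem.List.len s)).foldl (fun temp j =>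
          if PySem.Int.mod (PySem.List.pyGetD s key 0) (PySem.List.pyGetD s j 0) = 0
          then temp + 1 else temp) (0 : Int)
      max temp maxi) (0 : Int)
  let strength := maxi * 100000
  let test := instCount * validity
  if strength < test then [1, strength] else [0, strength]

-- ===== PORT B =====
def encryptionValidity_alt (instCount : Int) (validity : Int) (keys : List Int) : List Int :=
  let cnt : PySem.Dict Int Int := keys.foldl (fun d y => d.insert y (d.getD y 0 + 1)) PySem.Dict.empty
  let maxi := (PySem.Dict.keys cnt).foldl (fun maxi v =>
      let total := cnt.items.foldl (fun total p =>
          if p.1 ≤ v ∧ PySem.Int.mod v p.1 = 0 then total + p.2 else total) (0 : Int)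
      if total > maxi then total else maxi) (0 : Int)
  let strength := maxi * 100000
  if strength < instCount * validity then [1, strength] else [0, strength]

-- ===== PRECONDITION & SPEC =====
-- Pre_ excludes lists containing 0, on which Python A raises ZeroDivisionError (0 as a modulus).
def Pre_encryptionValidity (instCount : Int) (validity : Int) (keys : List Int) : Prop :=
  (0 : Int) ∉ keys
instance (instCount : Int) (validity : Int) (keys : List Int) : Decidable (Pre_encryptionValidity instCount validity keys) := by unfold Pre_encryptionValidity; infer_instance
def pvWitness_encryptionValidity : Int × Int × List Int := (1, 1, [2, 4, 3, 4])

def Spec_encryptionValidity (instCount : Int) (validity : Int) (keys : List Int) (out : List Int) : Prop := out = encryptionValidity_alt instCount validity keys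
instance (instCount : Int) (validity : Int) (keys : List Int) (out : List Int) : Decidable (Spec_encryptionValidity instCount validity keys out) := by unfold Spec_encryptionValidity; infer_instance

-- ===== CLAIM (what is proved, stated in full; the proofs are below) =====
def Claim_equal_encryptionValidity : Prop := ∀ (instCount : Int) (validity : Int) (keys : List Int), Dom_encryptionValidity instCount validity keys → Pre_encryptionValidity instCount validity keys → Spec_encryptionValidity instCount validity keys (encryptionValidity instCount validity keys)

-- ===== LEMMAS AND PROOFS =====

-- the divisibility test A applies on the sorted suffix
def pvQ (v y : Int) : Bool := decide (PySem.Int.mod v y = 0)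
-- the test B applies on each distinct value
def pvP (v y : Int) : Bool := decide (y ≤ v ∧ PySem.Int.mod v y = 0)

-- the list of A's inner-loop counts, one per suffix of the sorted list
def pvTC : List Int → List Int
  | [] => []
  | x :: t => (((x :: t).countP (pvQ x) : Nat) : Int) :: pvTC t

-- running maximum (both outer loops' shape)
def pvM (a : Int) (ys : List Int) : Int := ys.foldl (fun m t => max t m) a

theorem pvM_cons (a t : Int) (ys : List Int) : pvM a (t :: ys) = pvM (max t a) ys := rfl

theorem le_pvM_init (a : Int) (ys : List Int) : a ≤ pvM a ys := by
  induction ys generalizing a with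
  | nil => simp [pvM]
  | cons t ys ih =>
    rw [pvM_cons]
    exact le_trans (le_max_right t a) (ih _)

theorem mem_le_pvM (a t : Int) (ys : List Int) (h : t ∈ ys) : t ≤ pvM a ys := by
  induction ys generalizing a with
  | nil => cases h
  | cons u ys ih =>
    rw [pvM_cons]
    rcases List.mem_cons.mp h with rfl | h
    · exact le_trans (le_max_left t a) (le_pvM_init _ _)
    · exact ih _ h

theorem pvM_le (a c : Int) (ys : List Int) (ha : a ≤ c) (h : ∀ t ∈ ys, t ≤ c) :
    pvM a ys ≤ c := by
  induction ys generalizing a with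
  | nil => simpa [pvM] using ha
  | cons u ys ih =>
    rw [pvM_cons]
    exact ih _ (max_le (h u (List.mem_cons_self)) ha) (fun t ht => h t (List.mem_cons_of_mem _ ht))

theorem pvM_eq_of (xs ys : List Int)
    (h1 : ∀ t ∈ xs, ∃ u ∈ ys, t ≤ u) (h2 : ∀ u ∈ ys, ∃ t ∈ xs, u ≤ t) :
    pvM 0 xs = pvM 0 ys := by
  apply le_antisymm
  · refine pvM_le _ _ _ (le_pvM_init _ _) (fun t ht => ?_)
    obtain ⟨u, hu, htu⟩ := h1 t ht
    exact le_trans htu (mem_le_pvM _ _ _ hu)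
  · refine pvM_le _ _ _ (le_pvM_init _ _) (fun u hu => ?_)
    obtain ⟨t, ht, hut⟩ := h2 u hu
    exact le_trans hut (mem_le_pvM _ _ _ ht)

-- fold of running max over a mapped list
theorem foldl_max_map {α : Type} (f : α → Int) (l : List α) (a : Int) :
    l.foldl (fun m x => max (f x) m) a = pvM a (l.map f) := by
  induction l generalizing a with
  | nil => rfl
  | cons x l ih => simpa [pvM_cons] using ih (max (f x) a)

-- membership in pvTC: every entry is the count on some suffix
theorem mem_pvTC (s : List Int) (t : Int) (h : t ∈ pvTC s) :
    ∃ x suf, (x :: suf).IsSuffix s ∧ t = (((x :: suf).countP (pvQ x) : Nat) : Int) := by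
  induction s with
  | nil => cases h
  | cons x s ih =>
    rw [pvTC] at h
    rcases List.mem_cons.mp h with rfl | h
    · exact ⟨x, s, List.suffix_refl _, rfl⟩
    · obtain ⟨y, suf, hsuf, ht⟩ := ih h
      exact ⟨y, suf, hsuf.trans (List.suffix_cons _ _), ht⟩

-- pvTC of a tail is a suffix of pvTC of the whole list
theorem pvTC_suffix (pre l : List Int) : (pvTC l).IsSuffix (pvTC (pre ++ l)) := by
  induction pre with
  | nil => exact List.suffix_refl _
  | cons x pre ih =>
    refine ih.trans ?_
    rw [List.cons_append, pvTC]
    exact List.suffix_cons _ _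

-- first-occurrence split
theorem mem_split_first {v : Int} {s : List Int} (h : v ∈ s) :
    ∃ pre suf, s = pre ++ v :: suf ∧ v ∉ pre := by
  induction s with
  | nil => cases h
  | cons x s ih =>
    by_cases hx : x = v
    · exact ⟨[], s, by simp [hx], by simp⟩
    · rcases List.mem_cons.mp h with rfl | h
      · exact absurd rfl hx
      · obtain ⟨pre, suf, rfl, hnp⟩ := ih h
        exact ⟨x :: pre, suf, rfl, by simp [hnp, Ne.symm hx]⟩

-- the core identity: A's best suffix count equals the best distinct-value count
theorem core (keys : List Int) :
    pvM 0 (pvTC (PySem.List.sorted keys (fun x => x) true)) =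
    pvM 0 ((PySem.Set.ofList keys).map (fun v => ((keys.countP (pvP v) : Nat) : Int))) := by
  set s := PySem.List.sorted keys (fun x => x) true with hs
  have hperm : s.Perm keys := PySem.List.sorted_perm keys (fun x => x) true
  have hpw : s.Pairwise (fun a b => b ≤ a) := PySem.List.sorted_pairwise_rev keys (fun x => x)
  apply pvM_eq_of
  · -- each suffix count is at most B's count at the suffix head
    intro t ht
    obtain ⟨x, suf, hsuf, rfl⟩ := mem_pvTC s t ht
    have hxs : x ∈ s := hsuf.subset List.mem_cons_self
    refine ⟨((keys.countP (pvP x) : Nat) : Int), List.mem_map_of_mem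
      ((PySem.Set.mem_ofList keys x).mpr (hperm.mem_iff.mp hxs)), ?_⟩
    have hle : ∀ y ∈ x :: suf, y ≤ x := by
      have := hpw.sublist hsuf.sublist
      intro y hy
      rcases List.mem_cons.mp hy with rfl | hy
      · exact le_refl _
      · exact (List.pairwise_cons.mp this).1 y hy
    have hcong : (x :: suf).countP (pvQ x) = (x :: suf).countP (pvP x) :=
      List.countP_congr (fun y hy => by simp [pvQ, pvP, hle y hy])
    have hsub : (x :: suf).countP (pvP x) ≤ s.countP (pvP x) :=
      hsuf.sublist.countP_le
    have : s.countP (pvP x) = keys.countP (pvP x) := hperm.countP_eq _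
    exact_mod_cast hcong ▸ (this ▸ hsub)
  · -- the count at each distinct value is attained at its first occurrence in s
    intro u hu
    obtain ⟨v, hv, rfl⟩ := List.mem_map.mp hu
    have hvk : v ∈ keys := (PySem.Set.mem_ofList keys v).mp hv
    have hvs : v ∈ s := hperm.mem_iff.mpr hvk
    obtain ⟨pre, suf, hsplit, hnp⟩ := mem_split_first hvs
    refine ⟨(((v :: suf).countP (pvQ v) : Nat) : Int), ?_, ?_⟩
    · have := (pvTC_suffix pre (v :: suf)).subset
      rw [← hsplit] at this
      exact this (by rw [pvTC]; exact List.mem_cons_self)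
    · -- equality of the two counts
      have hpw' : (pre ++ v :: suf).Pairwise (fun a b => b ≤ a) := hsplit ▸ hpw
      have hpre : ∀ y ∈ pre, v ≤ y := by
        intro y hy
        exact (List.pairwise_append.mp hpw').2.2 y hy v List.mem_cons_self
      have hsufle : ∀ y ∈ v :: suf, y ≤ v := by
        intro y hy
        rcases List.mem_cons.mp hy with rfl | hy
        · exact le_refl _
        · exact (List.pairwise_cons.mp (List.pairwise_append.mp hpw').2.1).1 y hy
      have hzero : pre.countP (pvP v) = 0 := by
        refine List.countP_eq_zero.mpr (fun y hy => ?_)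
        have h1 : v ≤ y := hpre y hy
        have h2 : y ≠ v := fun h => hnp (h ▸ hy)
        simp only [pvP, decide_eq_true_eq]
        rintro ⟨hyv, -⟩
        exact h2 (le_antisymm hyv h1)
      have hcong : (v :: suf).countP (pvP v) = (v :: suf).countP (pvQ v) :=
        List.countP_congr (fun y hy => by simp [pvQ, pvP, hsufle y hy])
      have hkeys : keys.countP (pvP v) = (v :: suf).countP (pvQ v) := by
        have h1 : keys.countP (pvP v) = s.countP (pvP v) := (hperm.symm.countP_eq _)
        rw [h1, hsplit, List.countP_append, hzero, hcong, Nat.zero_add]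
      exact le_of_eq (by exact_mod_cast hkeys)

-- index form of the suffix-count list
theorem range_map_eq_pvTC (s : List Int) :
    (List.range s.length).map
      (fun k => (((s.drop k).countP (pvQ (s.getD k 0)) : Nat) : Int)) = pvTC s := by
  induction s with
  | nil => rfl
  | cons x s ih =>
    rw [List.length_cons, List.range_succ_eq_map, List.map_cons, List.map_map]
    rw [pvTC]
    congr 1

-- A's outer loop computes pvM 0 (pvTC s)
theorem A_maxi (s : List Int) :
    (PySem.List.pyRange 0 (PySem.List.len s)).foldl (fun maxi key =>
      max ((PySem.List.pyRange key (PySem.List.len s)).foldl (fun temp j =>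
          if PySem.Int.mod (PySem.List.pyGetD s key 0) (PySem.List.pyGetD s j 0) = 0
          then temp + 1 else temp) (0 : Int)) maxi) 0 = pvM 0 (pvTC s) := by
  have hbody : ∀ (maxi : Int), ∀ key ∈ PySem.List.pyRange 0 (PySem.List.len s),
      max ((PySem.List.pyRange key (PySem.List.len s)).foldl (fun temp j =>
          if PySem.Int.mod (PySem.List.pyGetD s key 0) (PySem.List.pyGetD s j 0) = 0
          then temp + 1 else temp) (0 : Int)) maxi =
      max ((((s.drop key.toNat).countP (pvQ (s.getD key.toNat 0)) : Nat) : Int)) maxi := by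
    intro maxi key hkey
    have h0 : 0 ≤ key := (PySem.List.mem_pyRange_one.mp hkey).1
    rw [PySem.List.pyGetD_of_nonneg s 0 h0,
        PySem.List.foldl_pyRange_pyGetD s 0
          (fun temp y => if PySem.Int.mod (s.getD key.toNat 0) y = 0 then temp + 1 else temp) 0 h0,
        PySem.List.foldl_ite_add_one (fun y => PySem.Int.mod (s.getD key.toNat 0) y = 0)]
    rw [zero_add]
    rfl
  rw [PySem.List.foldl_congr_mem _ _ _ _ hbody]
  have : PySem.List.pyRange 0 (PySem.List.len s) =
      (List.range s.length).map (fun k => ((k : Nat) : Int)) := by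
    rw [PySem.List.pyRange_one]
    simp [PySem.List.len_eq]
  rw [this, List.foldl_map]
  simp only [Int.toNat_natCast]
  rw [foldl_max_map (fun k => (((s.drop k).countP (pvQ (s.getD k 0)) : Nat) : Int)) (List.range s.length) 0,
      range_map_eq_pvTC]

-- summing the multiplicities of f's elements over a nodup cover of f gives f's length
theorem sum_count_cover (f S : List Int) (hnd : S.Nodup) (hsub : ∀ x ∈ f, x ∈ S) :
    (S.map (fun y => (f.count y : Int))).sum = (f.length : Int) := by
  induction S generalizing f with
  | nil =>
    have : f = [] := List.eq_nil_iff_forall_not_mem.mpr (fun x hx => by simpa using hsub x hx)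
    simp [this]
  | cons y S ih =>
    have hy : y ∉ S := (List.nodup_cons.mp hnd).1
    have hnd' : S.Nodup := (List.nodup_cons.mp hnd).2
    have hcnt : ∀ y' ∈ S, (f.filter (fun x => x ≠ y)).count y' = f.count y' := by
      intro y' hy'
      have hne : y' ≠ y := fun h => hy (h ▸ hy')
      simp [List.count_filter, hne]
    have hlen : f.length = f.count y + (f.filter (fun x => x ≠ y)).length := by
      rw [List.count_eq_countP, ← List.countP_eq_length_filter,
          List.length_eq_countP_add_countP (fun x => x == y) (l := f)]
      congr 1
      apply List.countP_congr
      intro x _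
      by_cases h : x = y <;> simp [h]
    have ihx := ih (f.filter (fun x => x ≠ y)) hnd'
      (fun x hx => by
        have hm := List.mem_filter.mp hx
        have : x ∈ y :: S := hsub x hm.1
        rcases List.mem_cons.mp this with h | h
        · subst h; simp at hm
        · exact h)
    rw [List.map_cons, List.sum_cons]
    have hmap : (S.map (fun y' => (f.count y' : Int))).sum
        = (S.map (fun y' => ((f.filter (fun x => x ≠ y)).count y' : Int))).sum := by
      apply congrArg
      apply List.map_congr_left
      intro y' hy'
      exact_mod_cast (hcnt y' hy').symm
    rw [hmap, ihx]
    push_cast [hlen]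
    ring

-- B's inner loop over the counter's items computes keys.countP (pvP v)
theorem B_total (keys : List Int) (v : Int) :
    ((PySem.Dict.counter keys).items).foldl (fun total p =>
        if p.1 ≤ v ∧ PySem.Int.mod v p.1 = 0 then total + p.2 else total) (0 : Int)
      = ((keys.countP (pvP v) : Nat) : Int) := by
  rw [PySem.Dict.items_counter, List.foldl_map]
  have hcong : ∀ (acc : Int), ∀ y ∈ PySem.Set.ofList keys,
      (if y ≤ v ∧ PySem.Int.mod v y = 0 then acc + (keys.count y : Int) else acc)
      = acc + ((keys.filter (pvP v)).count y : Int) := by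
    intro acc y _
    by_cases h : y ≤ v ∧ PySem.Int.mod v y = 0
    · have hb : pvP v y = true := by simp [pvP, h]
      rw [if_pos h, List.count_filter hb]
    · have hb : pvP v y = false := by simp [pvP]; tauto
      have h0 : (keys.filter (pvP v)).count y = 0 := by
        refine List.count_eq_zero.mpr (fun hm => ?_)
        have := (List.mem_filter.mp hm).2
        rw [hb] at this; cases this
      rw [if_neg h, h0]
      simp
  rw [PySem.List.foldl_congr_mem _ _ _ _ hcong,
      PySem.List.foldl_add (PySem.Set.ofList keys) (fun y => (((keys.filter (pvP v)).count y : Nat) : Int)) 0,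
      zero_add,
      sum_count_cover (keys.filter (pvP v)) (PySem.Set.ofList keys) (PySem.Set.nodup_ofList keys)
        (fun x hx => (PySem.Set.mem_ofList keys x).mpr (List.mem_filter.mp hx).1),
      List.countP_eq_length_filter]

-- B's outer loop computes pvM 0 of the distinct-value counts
theorem B_maxi (keys : List Int) :
    (PySem.Dict.keys ((keys.foldl (fun d y => d.insert y (d.getD y 0 + 1)) PySem.Dict.empty : PySem.Dict Int Int))).foldl
      (fun maxi v =>
        if ((keys.foldl (fun d y => d.insert y (d.getD y 0 + 1)) PySem.Dict.empty).items).foldl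
             (fun total p => if p.1 ≤ v ∧ PySem.Int.mod v p.1 = 0 then total + p.2 else total) (0 : Int) > maxi
        then ((keys.foldl (fun d y => d.insert y (d.getD y 0 + 1)) PySem.Dict.empty).items).foldl
             (fun total p => if p.1 ≤ v ∧ PySem.Int.mod v p.1 = 0 then total + p.2 else total) (0 : Int)
        else maxi) (0 : Int)
    = pvM 0 ((PySem.Set.ofList keys).map (fun v => ((keys.countP (pvP v) : Nat) : Int))) := by
  rw [PySem.Dict.foldl_insert_getD_add_one_eq_counter, PySem.Dict.keys_counter]
  have hcong : ∀ (maxi : Int), ∀ v ∈ PySem.Set.ofList keys,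
      (if ((PySem.Dict.counter keys).items).foldl
             (fun total p => if p.1 ≤ v ∧ PySem.Int.mod v p.1 = 0 then total + p.2 else total) (0 : Int) > maxi
        then ((PySem.Dict.counter keys).items).foldl
             (fun total p => if p.1 ≤ v ∧ PySem.Int.mod v p.1 = 0 then total + p.2 else total) (0 : Int)
        else maxi)
      = max ((keys.countP (pvP v) : Nat) : Int) maxi := by
    intro maxi v _
    rw [B_total keys v]
    rcases le_or_gt (((keys.countP (pvP v) : Nat) : Int)) maxi with h | h
    · rw [if_neg (by omega), max_eq_right h]
    · rw [if_pos h, max_eq_left (le_of_lt h)]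
  rw [PySem.List.foldl_congr_mem _ _ _ _ hcong]
  exact foldl_max_map _ _ _

-- ===== VERDICT (by name: the statement is the Claim_ definition above) =====
theorem encryptionValidity_spec : Claim_equal_encryptionValidity := by
  intro instCount validity keys _ _
  show encryptionValidity instCount validity keys = encryptionValidity_alt instCount validity keys
  simp only [encryptionValidity, encryptionValidity_alt]
  rw [A_maxi, B_maxi, core keys]
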